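-- pv_equiv track=rewrite | github.com/oghobhainn/19_bootcamp_python_42AI | day01/ex04/eval.py | enumerate_evaluate
-- ===== SOURCE A (Python) =====
-- def enumerate_evaluate(coefs,words):
-- 	try:
-- 		lenc = len(coefs)
-- 		lenw = len(words)
--
-- 		if lenc == lenw:
-- 			results = 0
-- 			for idx1, val1 in enumerate(coefs):
-- 				for idx2, val2 in enumerate(words):
-- 					if idx1 == idx2:
-- 						results += val1 * len(val2)
-- 			return results
-- 		else:
-- 			return -1
--
-- 	except:
-- 		return -1
-- ===== SOURCE B (Python) =====
-- def enumerate_evaluate(coefs, words):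
--     try:
--         if len(coefs) != len(words):
--             return -1
--         return sum(c * len(w) for c, w in zip(coefs, words))
--     except:
--         return -1
-- ===== Notes on version B (the rewrite author's own statement) =====
-- stated objective: faster
-- what changed: Replaces the O(n^2) nested enumerate loops (acting only on the diagonal idx1==idx2) with a single linear pass summing coef*len(word) over zip(coefs, words), after the same length-mismatch -> -1 guard.
import Mathlib
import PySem

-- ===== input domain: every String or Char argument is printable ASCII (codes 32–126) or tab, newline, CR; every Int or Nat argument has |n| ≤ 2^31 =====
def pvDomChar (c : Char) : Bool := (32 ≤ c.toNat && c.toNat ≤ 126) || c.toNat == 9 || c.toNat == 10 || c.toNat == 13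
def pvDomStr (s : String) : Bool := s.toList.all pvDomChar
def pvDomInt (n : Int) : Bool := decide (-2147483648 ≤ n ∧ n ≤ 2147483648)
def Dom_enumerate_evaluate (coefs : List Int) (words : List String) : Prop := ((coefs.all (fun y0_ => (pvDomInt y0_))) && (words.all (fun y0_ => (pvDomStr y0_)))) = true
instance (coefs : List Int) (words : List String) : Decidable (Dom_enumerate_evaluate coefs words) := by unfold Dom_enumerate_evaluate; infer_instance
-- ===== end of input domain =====

-- B replaces A's O(n^2) nested enumerate loops (diagonal-only) with a single linear pass
-- summing coef * len(word) over zip(coefs, words); return values are identical (faster objective).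

-- ===== PORT A =====
def enumerate_evaluate (coefs : List Int) (words : List String) : Int :=
  if coefs.length = words.length then
    (PySem.List.enumerate coefs).foldl
      (fun r p =>
        (PySem.List.enumerate words).foldl
          (fun r2 q => if p.1 = q.1 then r2 + p.2 * PySem.Str.len q.2 else r2) r) 0
  else -1

-- ===== PORT B =====
def enumerate_evaluate_alt (coefs : List Int) (words : List String) : Int :=
  if coefs.length ≠ words.length then -1
  else ((coefs.zip words).map (fun p => p.1 * PySem.Str.len p.2)).sum

-- ===== PRECONDITION & SPEC =====
def Spec_enumerate_evaluate (coefs : List Int) (words : List String) (out : Int) : Prop := out = enumerate_evaluate_alt coefs words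
instance (coefs : List Int) (words : List String) (out : Int) : Decidable (Spec_enumerate_evaluate coefs words out) := by unfold Spec_enumerate_evaluate; infer_instance

-- ===== CLAIM (what is proved, stated in full; the proofs are below) =====
def Claim_equal_enumerate_evaluate : Prop := ∀ (coefs : List Int) (words : List String), Dom_enumerate_evaluate coefs words → Spec_enumerate_evaluate coefs words (enumerate_evaluate coefs words)

-- ===== LEMMAS AND PROOFS =====

-- a fold that adds S p at each step is r plus the sum of S over the list
theorem pv_foldl_add_sum {α : Type} (S : α → Int) (l : List α) :
    ∀ r : Int, l.foldl (fun r p => r + S p) r = r + (l.map S).sum := by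
  induction l with
  | nil => intro r; simp
  | cons q t ih => intro r; simp [List.foldl_cons, ih]; ring

-- if every index in the enumeration is above i, the conditional sum vanishes
theorem pv_sum_enum_low (ws : List String) (v : Int) :
    ∀ (t i : Int), i < t →
      ((PySem.List.enumerate ws t).map
        (fun q => if i = q.1 then v * PySem.Str.len q.2 else 0)).sum = 0 := by
  induction ws with
  | nil => intro t i _; simp [PySem.List.enumerate_nil]
  | cons w tl ih =>
      intro t i hlt
      have hne : ¬ (i = t) := by omega
      rw [PySem.List.enumerate_cons, List.map_cons, List.sum_cons, if_neg hne,
        ih (t + 1) i (by omega)]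
      simp

-- double conditional sum over matching enumerations equals the zip sum
theorem pv_double_sum (cs : List Int) :
    ∀ (ws : List String) (s : Int), cs.length = ws.length →
      ((PySem.List.enumerate cs s).map
        (fun p => ((PySem.List.enumerate ws s).map
          (fun q => if p.1 = q.1 then p.2 * PySem.Str.len q.2 else 0)).sum)).sum
      = ((cs.zip ws).map (fun p => p.1 * PySem.Str.len p.2)).sum := by
  induction cs with
  | nil =>
      intro ws s h
      cases ws with
      | nil => simp [PySem.List.enumerate_nil]
      | cons w t => simp at h
  | cons c ct ih =>
      intro ws s h
      cases ws with
      | nil => simp at h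
      | cons w wt =>
        have hlen : ct.length = wt.length := by simpa using h
        have h1 : ((PySem.List.enumerate wt (s + 1)).map
            (fun q => if s = q.1 then c * PySem.Str.len q.2 else 0)).sum = 0 :=
          pv_sum_enum_low wt c (s + 1) s (by omega)
        have h2 : ((PySem.List.enumerate ct (s + 1)).map
            (fun p => (if p.1 = s then p.2 * PySem.Str.len w else 0) +
              ((PySem.List.enumerate wt (s + 1)).map
                (fun q => if p.1 = q.1 then p.2 * PySem.Str.len q.2 else 0)).sum)).sum
            = ((PySem.List.enumerate ct (s + 1)).map
            (fun p => ((PySem.List.enumerate wt (s + 1)).map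
                (fun q => if p.1 = q.1 then p.2 * PySem.Str.len q.2 else 0)).sum)).sum := by
          apply congrArg
          apply List.map_congr_left
          intro p hp
          rcases (PySem.List.mem_enumerate_iff _ _ _).1 hp with ⟨k, hk, rfl⟩
          have : ¬ ((s + 1 + (k : Int)) = s) := by omega
          simp [this]
        simp only [PySem.List.enumerate_cons, List.map_cons, List.sum_cons, List.zip_cons_cons]
        rw [if_true, h1, h2, ih wt (s + 1) hlen]
        ring

-- ===== VERDICT (by name: the statement is the Claim_ definition above) =====
theorem enumerate_evaluate_spec : Claim_equal_enumerate_evaluate := by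
  unfold Claim_equal_enumerate_evaluate Spec_enumerate_evaluate
  intro coefs words _
  unfold enumerate_evaluate enumerate_evaluate_alt
  by_cases h : coefs.length = words.length
  · simp only [h, ne_eq, not_true_eq_false, if_false]
    have hinner : ∀ (p : Int × Int) (r : Int),
        (PySem.List.enumerate words).foldl
          (fun r2 q => if p.1 = q.1 then r2 + p.2 * PySem.Str.len q.2 else r2) r
        = r + ((PySem.List.enumerate words).map
            (fun q => if p.1 = q.1 then p.2 * PySem.Str.len q.2 else 0)).sum := by
      intro p r
      have := pv_foldl_add_sum (fun q => if p.1 = q.1 then p.2 * PySem.Str.len q.2 else 0)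
        (PySem.List.enumerate words) r
      rw [← this]
      have hf : (fun (r2 : Int) (q : Int × String) => if p.1 = q.1 then r2 + p.2 * PySem.Str.len q.2 else r2)
          = (fun (r2 : Int) (q : Int × String) => r2 + if p.1 = q.1 then p.2 * PySem.Str.len q.2 else 0) := by
        funext r2 q
        split_ifs <;> simp
      rw [hf]
    have houter := pv_foldl_add_sum
      (fun p => ((PySem.List.enumerate words).map
        (fun q => if p.1 = q.1 then p.2 * PySem.Str.len q.2 else 0)).sum)
      (PySem.List.enumerate coefs) 0
    calc (PySem.List.enumerate coefs).foldl
          (fun r p => (PySem.List.enumerate words).foldl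
            (fun r2 q => if p.1 = q.1 then r2 + p.2 * PySem.Str.len q.2 else r2) r) 0
        = (PySem.List.enumerate coefs).foldl
          (fun r p => r + ((PySem.List.enumerate words).map
            (fun q => if p.1 = q.1 then p.2 * PySem.Str.len q.2 else 0)).sum) 0 := by
          have hf : (fun (r : Int) (p : Int × Int) =>
              (PySem.List.enumerate words).foldl
                (fun r2 q => if p.1 = q.1 then r2 + p.2 * PySem.Str.len q.2 else r2) r)
              = (fun (r : Int) (p : Int × Int) => r + ((PySem.List.enumerate words).map
                  (fun q => if p.1 = q.1 then p.2 * PySem.Str.len q.2 else 0)).sum) := by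
            funext r p
            exact hinner p r
          rw [hf]
      _ = ((coefs.zip words).map (fun p => p.1 * PySem.Str.len p.2)).sum := by
          rw [houter]
          simpa using pv_double_sum coefs words 0 h
  · simp [h]
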